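-- pv_equiv track=rewrite | github.com/Fzkuji/parallel-agent | src/cross_batch/distill_trainer.py | _build_oracle_inputs
-- ===== SOURCE A (Python) =====
-- from typing import Iterable, List, Optional
--
-- def _build_oracle_inputs(per_chunk_ids: List[List[int]]):
--     """Concat chunks into one long prompt; return input_ids and the
--     per-chunk "end" token positions in the concatenated sequence.
--
--     We accept token ids directly (not strings) — re-encoding decoded text
--     is not length-stable, so the dataset produces ids and we use them as-is.
--     """
--     # Defensive: ensure all chunks share the same length (required to
--     # batch them into a tensor below). If a stray short chunk slipped
--     # through, raising here makes the bug obvious in the log.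
--     lens = {len(ids) for ids in per_chunk_ids}
--     if len(lens) != 1:
--         raise ValueError(f"chunks have inconsistent lengths: {sorted(lens)}")
--     concat_ids = []
--     chunk_end_positions = []  # 0-indexed token end of each chunk in concat
--     for ids in per_chunk_ids:
--         concat_ids.extend(ids)
--         chunk_end_positions.append(len(concat_ids) - 1)
--     return concat_ids, chunk_end_positions, per_chunk_ids
-- ===== SOURCE B (Python) =====
-- from typing import List
--
-- def _build_oracle_inputs(per_chunk_ids: List[List[int]]):
--     lens = {len(ids) for ids in per_chunk_ids}
--     if len(lens) != 1:
--         raise ValueError(f"chunks have inconsistent lengths: {sorted(lens)}")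
--     L = len(per_chunk_ids[0])
--     concat_ids = [t for ids in per_chunk_ids for t in ids]
--     chunk_end_positions = [(i + 1) * L - 1 for i in range(len(per_chunk_ids))]
--     return concat_ids, chunk_end_positions, per_chunk_ids
-- ===== Notes on version B (the rewrite author's own statement) =====
-- stated objective: simpler
-- what changed: Replaces the single accumulating loop (extend + running-length tracking) by a flat comprehension for the concatenation and a closed-form formula (i+1)*L-1 for the per-chunk end positions.
import Mathlib
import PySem

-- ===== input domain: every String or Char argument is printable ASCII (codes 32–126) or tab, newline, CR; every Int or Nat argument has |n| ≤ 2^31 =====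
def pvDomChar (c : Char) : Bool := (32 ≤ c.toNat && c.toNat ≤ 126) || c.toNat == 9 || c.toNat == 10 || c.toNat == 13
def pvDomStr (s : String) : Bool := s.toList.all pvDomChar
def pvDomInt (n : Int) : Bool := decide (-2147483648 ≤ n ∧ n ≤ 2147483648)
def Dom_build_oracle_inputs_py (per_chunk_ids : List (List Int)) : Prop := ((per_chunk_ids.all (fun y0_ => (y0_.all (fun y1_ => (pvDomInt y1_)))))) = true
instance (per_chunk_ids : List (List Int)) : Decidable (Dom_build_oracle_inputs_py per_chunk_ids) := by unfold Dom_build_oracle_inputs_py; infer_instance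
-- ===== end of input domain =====

-- B replaces A's accumulating loop by a flat comprehension plus the closed-form
-- end positions (i+1)*L-1 (objective: simpler).

-- ===== PORT A =====
-- A's for-loop: extend concat_ids, append len(concat_ids)-1 after each chunk.
def pvLoopA : List (List Int) → List Int → List Int → List Int × List Int
  | [], acc, ends => (acc, ends)
  | ids :: rest, acc, ends =>
      pvLoopA rest (acc ++ ids) (ends ++ [((acc ++ ids).length : Int) - 1])

def build_oracle_inputs_py (per_chunk_ids : List (List Int)) : List Int × List Int × List (List Int) :=
  let lens : PySem.Set Int := PySem.Set.ofList (per_chunk_ids.map (fun ids => (ids.length : Int)))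
  if lens.length ≠ 1 then ([], [], per_chunk_ids)  -- raise ValueError (excluded by Pre_)
  else
    let (concat_ids, chunk_end_positions) := pvLoopA per_chunk_ids [] []
    (concat_ids, chunk_end_positions, per_chunk_ids)

-- ===== PORT B =====
def build_oracle_inputs_py_alt (per_chunk_ids : List (List Int)) : List Int × List Int × List (List Int) :=
  let lens : PySem.Set Int := PySem.Set.ofList (per_chunk_ids.map (fun ids => (ids.length : Int)))
  if lens.length ≠ 1 then ([], [], per_chunk_ids)  -- raise ValueError (excluded by Pre_)
  else
    let L : Int := ((per_chunk_ids.headD []).length : Int)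
    let concat_ids := per_chunk_ids.flatMap (fun ids => ids)
    let chunk_end_positions := (List.range per_chunk_ids.length).map (fun (i : Nat) => ((i : Int) + 1) * L - 1)
    (concat_ids, chunk_end_positions, per_chunk_ids)

-- ===== PRECONDITION & SPEC =====
-- Pre_ excludes exactly the inputs on which A raises ValueError (the empty list
-- of chunks, or chunks of inconsistent lengths); B raises the same error there.
def Pre_build_oracle_inputs_py (per_chunk_ids : List (List Int)) : Prop :=
  per_chunk_ids ≠ [] ∧ ∀ l ∈ per_chunk_ids, l.length = (per_chunk_ids.headD []).length
instance (per_chunk_ids : List (List Int)) : Decidable (Pre_build_oracle_inputs_py per_chunk_ids) := by unfold Pre_build_oracle_inputs_py; infer_instance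

def pvWitness_build_oracle_inputs_py : List (List Int) := [[1, 2], [3, 4], [5, 6]]

def Spec_build_oracle_inputs_py (per_chunk_ids : List (List Int)) (out : List Int × List Int × List (List Int)) : Prop := out = build_oracle_inputs_py_alt per_chunk_ids
instance (per_chunk_ids : List (List Int)) (out : List Int × List Int × List (List Int)) : Decidable (Spec_build_oracle_inputs_py per_chunk_ids out) := by unfold Spec_build_oracle_inputs_py; infer_instance

-- ===== CLAIM (what is proved, stated in full; the proofs are below) =====
def Claim_equal_build_oracle_inputs_py : Prop := ∀ (per_chunk_ids : List (List Int)), Dom_build_oracle_inputs_py per_chunk_ids → Pre_build_oracle_inputs_py per_chunk_ids → Spec_build_oracle_inputs_py per_chunk_ids (build_oracle_inputs_py per_chunk_ids)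

-- ===== LEMMAS AND PROOFS =====

-- A's loop, run on chunks of a common length L, yields the flattening and the
-- closed-form end positions shifted by the accumulator's length.
theorem pvLoopA_eq (rest : List (List Int)) (L : Nat) (h : ∀ l ∈ rest, l.length = L) :
    ∀ (acc ends : List Int),
      pvLoopA rest acc ends =
        (acc ++ rest.flatten,
         ends ++ (List.range rest.length).map
           (fun (i : Nat) => (acc.length : Int) + ((i : Int) + 1) * (L : Int) - 1)) := by
  induction rest with
  | nil => intro acc ends; simp [pvLoopA]
  | cons x xs ih =>
    intro acc ends
    have hx : x.length = L := h x (by simp)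
    have hxs : ∀ l ∈ xs, l.length = L := fun l hl => h l (by simp [hl])
    rw [pvLoopA, ih hxs]
    rw [Prod.mk.injEq]
    constructor
    · rw [List.flatten_cons, List.append_assoc]
    · rw [List.length_cons, List.range_succ_eq_map]
      simp only [List.map_cons, List.map_map]
      rw [List.append_assoc]
      congr 1
      simp only [List.singleton_append, List.cons.injEq]
      constructor
      · simp [hx]
      · apply List.map_congr_left
        intro i _
        simp [Function.comp, hx]
        ring

-- set(constant nonempty list) = singleton
theorem pvSet_const (c : Int) (l : List Int) (h : ∀ y ∈ l, y = c) :
    PySem.Set.ofList (c :: l) = [c] := by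
  have step : ∀ (m : List Int), (∀ y ∈ m, y = c) → m.foldl PySem.Set.add [c] = [c] := by
    intro m
    induction m with
    | nil => intro _; rfl
    | cons z zs ih =>
      intro hm
      have hz : z = c := hm z (by simp)
      have : PySem.Set.add [c] z = [c] := by
        subst hz; simp [PySem.Set.add, PySem.Set.contains]
      simp only [List.foldl_cons, this]
      exact ih (fun y hy => hm y (by simp [hy]))
  rw [PySem.Set.ofList_eq_foldl]
  simpa [PySem.Set.add, PySem.Set.empty] using step l h

-- ===== VERDICT (by name: the statement is the Claim_ definition above) =====
theorem build_oracle_inputs_py_spec : Claim_equal_build_oracle_inputs_py := by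
  intro p _ hpre
  unfold Spec_build_oracle_inputs_py
  obtain ⟨hne, hlen⟩ := hpre
  match p, hne with
  | x :: xs, _ =>
    have hall : ∀ l ∈ x :: xs, l.length = x.length := by
      simpa [List.headD] using hlen
    have hset : PySem.Set.ofList (((x :: xs).map (fun ids => ((ids.length : Int))))) = [(x.length : Int)] := by
      simp only [List.map_cons]
      apply pvSet_const
      intro y hy
      obtain ⟨l, hl, rfl⟩ := List.mem_map.mp hy
      exact_mod_cast hall l (List.mem_cons_of_mem _ hl)
    unfold build_oracle_inputs_py build_oracle_inputs_py_alt
    simp only [hset]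
    have hcond : ¬(([(x.length : Int)] : List Int).length ≠ 1) := by simp
    rw [if_neg hcond, if_neg hcond]
    rw [pvLoopA_eq (x :: xs) x.length hall [] []]
    rw [Prod.mk.injEq, Prod.mk.injEq]
    refine ⟨?_, ?_, rfl⟩
    · simp [List.flatMap_def]
    · apply List.map_congr_left
      intro i _
      simp [List.headD]
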